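-- pv_equiv track=rewrite | github.com/IES-Rafael-Alberti/2324-u3-conjuntos-FcoJose2 | src/Ejercicio1.py | obtenerDomicilios
-- ===== SOURCE A (Python) =====
-- def obtenerDomicilios(compras):
--     domicilios_facturas = set()
--     clientes_domicilios = {}
--
--     for compra in compras:
--         cliente, dia_del_mes, monto, domicilio = compra
--
--         if cliente not in clientes_domicilios:
--             clientes_domicilios[cliente] = set()
--
--         clientes_domicilios[cliente].add(domicilio)
--
--     for domicilios in clientes_domicilios.values():
--         domicilios_facturas.update(domicilios)
--
--     return list(domicilios_facturas)
-- ===== SOURCE B (Python) =====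
-- def obtenerDomicilios(compras):
--     domicilios_facturas = set()
--     for cliente, dia_del_mes, monto, domicilio in compras:
--         domicilios_facturas.add(domicilio)
--     return list(domicilios_facturas)
-- ===== Notes on version B (the rewrite author's own statement) =====
-- stated objective: simpler
-- what changed: Drops the per-client grouping dict and the second merge pass; one loop adds each record's address straight into a single set.
import Mathlib
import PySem

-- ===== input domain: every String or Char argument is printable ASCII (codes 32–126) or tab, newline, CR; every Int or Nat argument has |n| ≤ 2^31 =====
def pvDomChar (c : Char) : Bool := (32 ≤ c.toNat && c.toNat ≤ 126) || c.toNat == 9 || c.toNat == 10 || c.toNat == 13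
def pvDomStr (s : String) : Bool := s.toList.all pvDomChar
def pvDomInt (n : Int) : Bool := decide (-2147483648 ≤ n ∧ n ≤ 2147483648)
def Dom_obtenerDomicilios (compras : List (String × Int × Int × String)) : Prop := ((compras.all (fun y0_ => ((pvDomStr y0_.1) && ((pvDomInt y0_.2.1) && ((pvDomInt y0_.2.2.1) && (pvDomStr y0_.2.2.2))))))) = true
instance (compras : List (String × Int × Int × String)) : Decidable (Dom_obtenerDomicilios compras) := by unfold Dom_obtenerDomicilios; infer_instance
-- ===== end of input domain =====

-- B drops A's per-client grouping dict and merge pass: one loop adds each address into a single set (simpler).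
-- Python's list(set) iteration order is hash-arbitrary and not modelled (outputs are compared as sets);
-- both ports return the set's elements in the canonical sorted order.

-- ===== PORT A =====
def obtenerDomicilios (compras : List (String × Int × Int × String)) : List String :=
  -- clientes_domicilios: dict cliente -> set of domicilios, built record by record
  let clientes : PySem.Dict String (PySem.Set String) :=
    compras.foldl (fun d compra =>
      let cliente := compra.1
      let domicilio := compra.2.2.2
      let d := if d.contains cliente then d else d.insert cliente PySem.Set.empty
      d.modify cliente PySem.Set.empty (fun s => PySem.Set.add s domicilio)) PySem.Dict.empty
  -- for domicilios in clientes_domicilios.values(): domicilios_facturas.update(domicilios)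
  let facturas : PySem.Set String :=
    (PySem.Dict.values clientes).foldl (fun acc s => PySem.Set.update acc s) PySem.Set.empty
  PySem.List.sorted facturas (fun x => x) false

-- ===== PORT B =====
def obtenerDomicilios_alt (compras : List (String × Int × Int × String)) : List String :=
  let facturas : PySem.Set String :=
    compras.foldl (fun s compra => PySem.Set.add s compra.2.2.2) PySem.Set.empty
  PySem.List.sorted facturas (fun x => x) false

-- ===== PRECONDITION & SPEC =====
def Spec_obtenerDomicilios (compras : List (String × Int × Int × String)) (out : List String) : Prop := out = obtenerDomicilios_alt compras
instance (compras : List (String × Int × Int × String)) (out : List String) : Decidable (Spec_obtenerDomicilios compras out) := by unfold Spec_obtenerDomicilios; infer_instance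

-- ===== CLAIM (what is proved, stated in full; the proofs are below) =====
def Claim_equal_obtenerDomicilios : Prop := ∀ (compras : List (String × Int × Int × String)), Dom_obtenerDomicilios compras → Spec_obtenerDomicilios compras (obtenerDomicilios compras)

-- ===== LEMMAS AND PROOFS =====

-- one step of A's dict-building loop, read through getD
lemma stepA_getD (d : PySem.Dict String (PySem.Set String)) (c : String × Int × Int × String) (k : String) :
    ((if d.contains c.1 then d else d.insert c.1 PySem.Set.empty).modify c.1 PySem.Set.empty
        (fun s => PySem.Set.add s c.2.2.2)).getD k PySem.Set.empty
      = if k = c.1 then PySem.Set.add (d.getD c.1 PySem.Set.empty) c.2.2.2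
        else d.getD k PySem.Set.empty := by
  by_cases hc : d.contains c.1
  · rw [if_pos hc, PySem.Dict.getD_modify]
  · rw [if_neg hc, PySem.Dict.getD_modify]
    have he : d.getD c.1 PySem.Set.empty = PySem.Set.empty :=
      PySem.Dict.getD_of_not_contains d _ (by simpa using hc)
    by_cases hk : k = c.1
    · rw [if_pos hk, if_pos hk, PySem.Dict.getD_insert_self, he]
    · rw [if_neg hk, if_neg hk, PySem.Dict.getD_insert_of_ne _ _ _ hk]

lemma stepA_keys_mem (d : PySem.Dict String (PySem.Set String)) (c : String × Int × Int × String) (k : String) :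
    (k ∈ ((if d.contains c.1 then d else d.insert c.1 PySem.Set.empty).modify c.1 PySem.Set.empty
        (fun s => PySem.Set.add s c.2.2.2)).keys)
      ↔ (k = c.1 ∨ k ∈ d.keys) := by
  by_cases hc : d.contains c.1
  · rw [if_pos hc, PySem.Dict.keys_modify, PySem.Dict.mem_keys_insert]
  · rw [if_neg hc, PySem.Dict.keys_modify, PySem.Dict.mem_keys_insert,
      PySem.Dict.mem_keys_insert]
    tauto

lemma stepA_keys_nodup (d : PySem.Dict String (PySem.Set String)) (c : String × Int × Int × String)
    (h : d.keys.Nodup) :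
    ((if d.contains c.1 then d else d.insert c.1 PySem.Set.empty).modify c.1 PySem.Set.empty
        (fun s => PySem.Set.add s c.2.2.2)).keys.Nodup := by
  by_cases hc : d.contains c.1
  · rw [if_pos hc, PySem.Dict.keys_modify]
    exact PySem.Dict.nodup_keys_insert d c.1 _ h
  · rw [if_neg hc, PySem.Dict.keys_modify]
    exact PySem.Dict.nodup_keys_insert _ c.1 _ (PySem.Dict.nodup_keys_insert d c.1 _ h)

-- the union of the values of A's dict, read as "x appears under some key"
lemma foldA_mem (compras : List (String × Int × Int × String))
    (d : PySem.Dict String (PySem.Set String)) (x : String) :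
    ((∃ k ∈ (compras.foldl (fun d compra =>
        let cliente := compra.1
        let domicilio := compra.2.2.2
        let d := if d.contains cliente then d else d.insert cliente PySem.Set.empty
        d.modify cliente PySem.Set.empty (fun s => PySem.Set.add s domicilio)) d).keys,
        x ∈ (compras.foldl (fun d compra =>
        let cliente := compra.1
        let domicilio := compra.2.2.2
        let d := if d.contains cliente then d else d.insert cliente PySem.Set.empty
        d.modify cliente PySem.Set.empty (fun s => PySem.Set.add s domicilio)) d).getD k PySem.Set.empty)
      ↔ ((∃ k ∈ d.keys, x ∈ d.getD k PySem.Set.empty) ∨ ∃ c ∈ compras, x = c.2.2.2)) := by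
  induction compras generalizing d with
  | nil => simp
  | cons c cs ih =>
    simp only [List.foldl_cons]
    rw [ih]
    constructor
    · rintro (⟨k, hk, hx⟩ | ⟨c', hc', rfl⟩)
      · rw [stepA_keys_mem] at hk
        rw [stepA_getD] at hx
        by_cases hkc : k = c.1
        · rw [if_pos hkc] at hx
          rcases (PySem.Set.mem_add ..).1 hx with hx | rfl
          · by_cases hmem : c.1 ∈ d.keys
            · exact Or.inl ⟨c.1, hmem, hx⟩
            · exfalso
              have hcf : d.contains c.1 = false := by
                cases h : d.contains c.1 with
                | false => rfl
                | true => exact absurd ((PySem.Dict.contains_iff_mem_keys ..).1 h) hmem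
              rw [PySem.Dict.getD_of_not_contains d _ hcf] at hx
              simp [PySem.Set.empty] at hx
          · exact Or.inr ⟨c, List.mem_cons_self, rfl⟩
        · rw [if_neg hkc] at hx
          rcases hk with rfl | hk
          · exact absurd rfl hkc
          · exact Or.inl ⟨k, hk, hx⟩
      · exact Or.inr ⟨c', List.mem_cons_of_mem _ hc', rfl⟩
    · rintro (⟨k, hk, hx⟩ | ⟨c', hc', rfl⟩)
      · left
        by_cases hkc : k = c.1
        · exact ⟨c.1, by rw [stepA_keys_mem]; exact Or.inl rfl,
            by rw [stepA_getD, if_pos rfl, ← hkc]; exact (PySem.Set.mem_add ..).2 (Or.inl hx)⟩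
        · exact ⟨k, by rw [stepA_keys_mem]; exact Or.inr hk,
            by rw [stepA_getD, if_neg hkc]; exact hx⟩
      · rcases List.mem_cons.1 hc' with rfl | hc'
        · left
          exact ⟨c'.1, by rw [stepA_keys_mem]; exact Or.inl rfl,
            by rw [stepA_getD, if_pos rfl]; exact (PySem.Set.mem_add ..).2 (Or.inr rfl)⟩
        · exact Or.inr ⟨c', hc', rfl⟩

lemma foldA_keys_nodup (compras : List (String × Int × Int × String))
    (d : PySem.Dict String (PySem.Set String)) (h : d.keys.Nodup) :
    (compras.foldl (fun d compra =>
        let cliente := compra.1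
        let domicilio := compra.2.2.2
        let d := if d.contains cliente then d else d.insert cliente PySem.Set.empty
        d.modify cliente PySem.Set.empty (fun s => PySem.Set.add s domicilio)) d).keys.Nodup := by
  induction compras generalizing d with
  | nil => exact h
  | cons c cs ih => exact ih _ (stepA_keys_nodup d c h)

-- A's merge loop: membership and nodup of 'for s in vals: acc.update(s)'
lemma foldl_update_mem (vals : List (PySem.Set String)) (acc : PySem.Set String) (x : String) :
    x ∈ vals.foldl (fun acc s => PySem.Set.update acc s) acc ↔ x ∈ acc ∨ ∃ s ∈ vals, x ∈ s := by
  induction vals generalizing acc with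
  | nil => simp
  | cons v vs ih =>
    simp only [List.foldl_cons, ih, PySem.Set.mem_update]
    constructor
    · rintro (( h | h) | ⟨s, hs, hx⟩)
      · exact Or.inl h
      · exact Or.inr ⟨v, List.mem_cons_self, h⟩
      · exact Or.inr ⟨s, List.mem_cons_of_mem _ hs, hx⟩
    · rintro (h | ⟨s, hs, hx⟩)
      · exact Or.inl (Or.inl h)
      · rcases List.mem_cons.1 hs with rfl | hs
        · exact Or.inl (Or.inr hx)
        · exact Or.inr ⟨s, hs, hx⟩

lemma foldl_update_nodup (vals : List (PySem.Set String)) (acc : PySem.Set String)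
    (h : acc.Nodup) : (vals.foldl (fun acc s => PySem.Set.update acc s) acc).Nodup := by
  induction vals generalizing acc with
  | nil => exact h
  | cons v vs ih => exact ih _ (PySem.Set.nodup_update _ _ h)

-- ===== VERDICT (by name: the statement is the Claim_ definition above) =====
theorem obtenerDomicilios_spec : Claim_equal_obtenerDomicilios := by
  intro compras _
  unfold Spec_obtenerDomicilios obtenerDomicilios obtenerDomicilios_alt
  -- B's set is set(map (·.2.2.2) compras)
  have hB : compras.foldl (fun s compra => PySem.Set.add s compra.2.2.2) PySem.Set.empty
      = PySem.Set.ofList (compras.map (fun c => c.2.2.2)) := by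
    rw [PySem.Set.ofList_eq_foldl, List.foldl_map]
    rfl
  rw [hB]
  apply PySem.List.sorted_eq_of_perm_of_pairwise_lt
  · -- sorted(B's set) is a permutation of A's merged set
    refine (PySem.List.sorted_perm ..).trans ?_
    rw [List.perm_ext_iff_of_nodup (PySem.Set.nodup_ofList _)
      (foldl_update_nodup _ PySem.Set.empty List.nodup_nil)]
    intro x
    rw [PySem.Set.mem_ofList, foldl_update_mem]
    have hvals : (∃ s ∈ PySem.Dict.values (compras.foldl (fun d compra =>
        let cliente := compra.1
        let domicilio := compra.2.2.2
        let d := if d.contains cliente then d else d.insert cliente PySem.Set.empty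
        d.modify cliente PySem.Set.empty (fun s => PySem.Set.add s domicilio)) PySem.Dict.empty), x ∈ s)
        ↔ ∃ c ∈ compras, x = c.2.2.2 := by
      rw [PySem.Dict.values_eq_map_keys _ (foldA_keys_nodup compras PySem.Dict.empty (by simp)) PySem.Set.empty]
      constructor
      · rintro ⟨s, hs, hx⟩
        rcases List.mem_map.1 hs with ⟨k, hk, rfl⟩
        exact ((foldA_mem compras PySem.Dict.empty x).1 ⟨k, hk, hx⟩).resolve_left (by simp)
      · intro h
        rcases (foldA_mem compras PySem.Dict.empty x).2 (Or.inr h) with ⟨k, hk, hx⟩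
        exact ⟨_, List.mem_map_of_mem hk, hx⟩
    rw [hvals]
    simp only [List.mem_map, PySem.Set.empty, List.not_mem_nil, false_or]
    constructor
    · rintro ⟨c, hc, rfl⟩; exact ⟨c, hc, rfl⟩
    · rintro ⟨c, hc, rfl⟩; exact ⟨c, hc, rfl⟩
  · exact PySem.List.sorted_ofList_pairwise_lt ..
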